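-- pv_equiv track=rewrite | github.com/productiontype/Georama | sources/tools/fix-name-table.py | return_familyname
-- ===== SOURCE A (Python) =====
-- import unicodedata
--
-- def return_filename_no_extension(filename):
--     filename_no_extension = filename.split(".")[0]
--     return filename_no_extension
--
-- def return_familyname(filename):
--     name = return_filename_no_extension(filename).split("-")[0]
--     parts = []
--     i = 0
--     for s in name:
--         if unicodedata.category(s) == 'Lu':
--             part = name[:i]
--             if part:
--                 parts.append(part)
--             name = name[i:]
--             i = 0
--         i += 1
--     parts.append(name)
--
--     return ' '.join(parts)
-- ===== SOURCE B (Python) =====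
-- import unicodedata
--
-- def return_familyname(filename):
--     name = filename.split(".")[0].split("-")[0]
--     words = [""]
--     for c in reversed(name):
--         words[0] = c + words[0]
--         if unicodedata.category(c) == 'Lu':
--             words.insert(0, "")
--     if words[0] == "" and len(words) > 1:
--         words.pop(0)
--     return ' '.join(words)
-- ===== Notes on version B (the rewrite author's own statement) =====
-- stated objective: alternative
-- what changed: B builds the word list back-to-front with a single reversed right-to-left pass (prepend each char to the current word, open a new word after each uppercase), replacing A's forward scan that repeatedly reslices the string with a running index.
import Mathlib
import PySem

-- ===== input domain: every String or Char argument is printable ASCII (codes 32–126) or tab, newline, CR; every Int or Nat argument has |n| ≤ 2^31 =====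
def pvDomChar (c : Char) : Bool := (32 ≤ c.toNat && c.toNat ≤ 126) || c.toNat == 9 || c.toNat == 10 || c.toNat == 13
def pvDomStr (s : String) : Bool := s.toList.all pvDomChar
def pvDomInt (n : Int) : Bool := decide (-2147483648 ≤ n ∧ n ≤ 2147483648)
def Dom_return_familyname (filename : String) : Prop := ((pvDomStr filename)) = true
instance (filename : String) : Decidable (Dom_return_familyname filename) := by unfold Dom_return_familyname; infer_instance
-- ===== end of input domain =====

-- B replaces A's forward index-and-reslice scan by a single reversed pass building the
-- word list back-to-front (objective: alternative; same asymptotic cost).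

-- unicodedata.category(c) == 'Lu' — exact on the printable-ASCII domain, where the
-- uppercase letters are exactly 'A'..'Z'. Shared model of the library call by both ports.
def pvIsLu (c : Char) : Bool := decide ('A' ≤ c ∧ c ≤ 'Z')

-- ===== PORT A =====
-- helper: return_filename_no_extension, on the code-point list (filename.split(".")[0];
-- split with a nonempty separator always yields a nonempty list, so [0] is headI).
def return_filename_no_extension_l (cs : List Char) : List Char :=
  (PySem.Chars.splitOn cs ['.']).headI

-- one iteration of A's for-loop; state = (parts, name, i).  Python's slices name[:i] /
-- name[i:] with i : Nat are exactly take/drop.  'if part:' is nonemptiness.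
def pvStepA (st : List (List Char) × List Char × Nat) (s : Char) :
    List (List Char) × List Char × Nat :=
  let (parts, name, i) := st
  if pvIsLu s then
    let part := name.take i
    let parts := if part ≠ [] then parts ++ [part] else parts
    (parts, name.drop i, 0 + 1)          -- name = name[i:]; i = 0; then i += 1
  else
    (parts, name, i + 1)

-- Python's 'for s in name' iterates over the string object bound at loop entry, so the
-- loop runs over name0 even though 'name' is reassigned inside: a foldl over name0.
def return_familyname (filename : String) : String :=
  let name0 := (PySem.Chars.splitOn (return_filename_no_extension_l filename.toList) ['-']).headI
  let st := name0.foldl pvStepA ([], name0, 0)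
  String.ofList (PySem.Chars.join [' '] (st.1 ++ [st.2.1]))

-- ===== PORT B =====
-- one iteration of B's loop over reversed(name): words[0] = c + words[0], then insert ""
-- in front after an uppercase.  words is never empty; the [] branch is unreachable.
def pvStepB (ws : List (List Char)) (c : Char) : List (List Char) :=
  match ws with
  | w :: rest => if pvIsLu c then [] :: (c :: w) :: rest else (c :: w) :: rest
  | [] => [[c]]

def return_familyname_alt (filename : String) : String :=
  let name := (PySem.Chars.splitOn ((PySem.Chars.splitOn filename.toList ['.']).headI) ['-']).headI
  let words := name.reverse.foldl pvStepB [[]]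
  let words := match words with
    | w :: rest => if w = [] ∧ rest ≠ [] then rest else w :: rest   -- pop leading "" word
    | [] => []
  String.ofList (PySem.Chars.join [' '] words)

-- ===== PRECONDITION & SPEC =====
def Spec_return_familyname (filename : String) (out : String) : Prop := out = return_familyname_alt filename
instance (filename : String) (out : String) : Decidable (Spec_return_familyname filename out) := by unfold Spec_return_familyname; infer_instance

-- ===== CLAIM (what is proved, stated in full; the proofs are below) =====
def Claim_equal_return_familyname : Prop := ∀ (filename : String), Dom_return_familyname filename → Spec_return_familyname filename (return_familyname filename)

-- ===== LEMMAS AND PROOFS =====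

-- B's loop as a foldr (fold over the reversed list, read left-to-right)
def pvR (s : List Char) : List (List Char) := s.foldr (fun c ws => pvStepB ws c) [[]]

theorem pvStepB_ne_nil (ws : List (List Char)) (c : Char) : pvStepB ws c ≠ [] := by
  cases ws with
  | nil => simp [pvStepB]
  | cons w rest => simp only [pvStepB]; split <;> simp

theorem pvR_ne_nil (s : List Char) : pvR s ≠ [] := by
  cases s with
  | nil => simp [pvR]
  | cons c rest => exact pvStepB_ne_nil _ _

-- main invariant: A's fold from state (parts, pre ++ s, |pre|) over the remaining
-- characters s produces exactly parts ++ the words B computes on s, with pre glued onto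
-- the first of them.
theorem pvMainA (s : List Char) : ∀ (pre : List Char) (parts : List (List Char))
    (w : List Char) (ws : List (List Char)), pre ≠ [] → pvR s = w :: ws →
    (let st := s.foldl pvStepA (parts, pre ++ s, pre.length)
     st.1 ++ [st.2.1]) = parts ++ (pre ++ w) :: ws := by
  induction s with
  | nil =>
    intro pre parts w ws _ hR
    simp only [pvR, List.foldr_nil] at hR
    cases hR
    simp
  | cons c rest ih =>
    intro pre parts w ws hpre hR
    obtain ⟨w', ws', hrest⟩ : ∃ w' ws', pvR rest = w' :: ws' := by
      cases h : pvR rest with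
      | nil => exact absurd h (pvR_ne_nil rest)
      | cons a b => exact ⟨a, b, rfl⟩
    simp only [pvR, List.foldr_cons] at hR
    rw [show rest.foldr (fun c ws => pvStepB ws c) [[]] = pvR rest from rfl, hrest] at hR
    simp only [List.foldl_cons]
    by_cases hc : pvIsLu c = true
    · -- uppercase: A closes the word pre; B opened a fresh word here
      have hstep : pvStepA (parts, pre ++ c :: rest, pre.length) c
          = (parts ++ [pre], ([c] ++ rest : List Char), ([c] : List Char).length) := by
        simp [pvStepA, hc, hpre]
      rw [hstep, ih [c] (parts ++ [pre]) w' ws' (by simp) hrest]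
      simp only [pvStepB, hc, if_pos] at hR
      cases hR
      simp
    · -- not uppercase: the current word grows by c
      have hstep : pvStepA (parts, pre ++ c :: rest, pre.length) c
          = (parts, ((pre ++ [c]) ++ rest : List Char), (pre ++ [c]).length) := by
        simp [pvStepA, hc]
      rw [hstep, ih (pre ++ [c]) parts w' ws' (by simp) hrest]
      simp only [pvStepB, hc, if_neg, Bool.false_eq_true, not_false_iff] at hR
      cases hR
      simp

-- the two word lists coincide for every source string
theorem pvWords_eq (n : List Char) :
    (let st := n.foldl pvStepA ([], n, 0); st.1 ++ [st.2.1])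
      = (match n.reverse.foldl pvStepB [[]] with
         | w :: rest => if w = [] ∧ rest ≠ [] then rest else w :: rest
         | [] => []) := by
  rw [List.foldl_reverse]
  show _ = (match pvR n with | w :: rest => if w = [] ∧ rest ≠ [] then rest else w :: rest | [] => [])
  cases n with
  | nil => simp [pvR]
  | cons c rest =>
    obtain ⟨w', ws', hrest⟩ : ∃ w' ws', pvR rest = w' :: ws' := by
      cases h : pvR rest with
      | nil => exact absurd h (pvR_ne_nil rest)
      | cons a b => exact ⟨a, b, rfl⟩
    -- the first loop iteration of A reaches state ([], [c] ++ rest, 1) in both branches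
    have hfirst : pvStepA ([], c :: rest, 0) c = ([], ([c] ++ rest : List Char), ([c] : List Char).length) := by
      by_cases hc : pvIsLu c = true <;> simp [pvStepA, hc]
    have hA := pvMainA rest [c] [] w' ws' (by simp) hrest
    simp only [List.foldl_cons, hfirst]
    rw [hA]
    have hRn : pvR (c :: rest) = pvStepB (w' :: ws') c := by
      simp only [pvR, List.foldr_cons]
      rw [show rest.foldr (fun c ws => pvStepB ws c) [[]] = pvR rest from rfl, hrest]
    rw [hRn]
    by_cases hc : pvIsLu c = true
    · simp [pvStepB, hc]
    · simp [pvStepB, hc]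

-- ===== VERDICT (by name: the statement is the Claim_ definition above) =====
theorem return_familyname_spec : Claim_equal_return_familyname := by
  intro filename _
  show return_familyname filename = return_familyname_alt filename
  unfold return_familyname return_familyname_alt return_filename_no_extension_l
  exact congrArg (fun l => String.ofList (PySem.Chars.join [' '] l)) (pvWords_eq _)
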